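-- pv_equiv track=rewrite | github.com/Marianooss/OAPCE-BI-MT | data_import_manager.py | _get_field_descriptions
-- ===== SOURCE A (Python) =====
-- from typing import Dict, List, Optional, Any
--
-- def _get_field_descriptions(table_name: str, columns_info: Dict[str, str]) -> Dict:
--     """
--     Obtiene descripciones de campos genéricas basadas en el esquema dinámico.
--     """
--     descriptions = {}
--     for col_name, col_type in columns_info.items():
--         descriptions[col_name] = f'Campo {col_name} de tipo {col_type}.'
--         if col_name == 'id':
--             descriptions[col_name] = 'Identificador único para el registro.'
--         elif 'fecha' in col_name.lower() or 'date' in col_name.lower():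
--             descriptions[col_name] = 'Fecha en formato YYYY-MM-DD o YYYY-MM-DD HH:MM:SS.'
--         elif 'monto' in col_name.lower() or 'valor' in col_name.lower():
--             descriptions[col_name] = 'Valor monetario o numérico.'
--         elif 'email' in col_name.lower():
--             descriptions[col_name] = 'Dirección de correo electrónico.'
--         elif 'telefono' in col_name.lower():
--             descriptions[col_name] = 'Número de teléfono.'
--     return descriptions
-- ===== SOURCE B (Python) =====
-- # B: staged overwrite passes — first build every default description, then run
-- # one whole-dict pass per rule in REVERSE priority order, so the last write
-- # (the highest-priority matching rule) wins.  Different traversal: per-rule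
-- # passes over the data instead of a per-key first-match cascade.
--
-- def _get_field_descriptions(table_name, columns_info):
--     desc = {n: f'Campo {n} de tipo {t}.' for n, t in columns_info.items()}
--     # overwrite passes in reverse priority: a later pass overwrites an earlier
--     # one, so the final text of a key is its highest-priority matching rule
--     for n in columns_info:
--         if 'telefono' in n.lower():
--             desc[n] = 'Número de teléfono.'
--     for n in columns_info:
--         if 'email' in n.lower():
--             desc[n] = 'Dirección de correo electrónico.'
--     for n in columns_info:
--         low = n.lower()
--         if 'monto' in low or 'valor' in low:
--             desc[n] = 'Valor monetario o numérico.'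
--     for n in columns_info:
--         low = n.lower()
--         if 'fecha' in low or 'date' in low:
--             desc[n] = 'Fecha en formato YYYY-MM-DD o YYYY-MM-DD HH:MM:SS.'
--     for n in columns_info:
--         if n == 'id':
--             desc[n] = 'Identificador único para el registro.'
--     return desc
-- ===== Notes on version B (the rewrite author's own statement) =====
-- stated objective: alternative
-- what changed: Replaces the per-key if/elif first-match cascade with staged whole-dict overwrite passes: defaults are built first, then one pass per rule runs in reverse priority order so the last write (highest-priority match) wins.
import Mathlib
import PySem

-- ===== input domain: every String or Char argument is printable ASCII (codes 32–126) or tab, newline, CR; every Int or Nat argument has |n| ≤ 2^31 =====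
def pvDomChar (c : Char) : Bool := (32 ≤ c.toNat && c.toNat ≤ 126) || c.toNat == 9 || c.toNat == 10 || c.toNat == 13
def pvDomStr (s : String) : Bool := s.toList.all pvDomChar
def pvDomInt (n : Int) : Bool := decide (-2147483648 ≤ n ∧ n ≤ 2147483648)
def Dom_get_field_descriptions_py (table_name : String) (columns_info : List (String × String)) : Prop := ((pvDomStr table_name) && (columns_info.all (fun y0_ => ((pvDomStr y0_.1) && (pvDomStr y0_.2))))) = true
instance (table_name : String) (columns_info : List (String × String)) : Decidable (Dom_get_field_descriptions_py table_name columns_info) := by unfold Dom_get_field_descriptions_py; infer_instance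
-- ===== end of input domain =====

-- B replaces A's per-key if/elif first-match cascade by staged whole-dict
-- overwrite passes in reverse priority order (last write wins); alternative
-- structure, same outputs.

-- ===== PORT A =====
-- literal port of A: per column, assign the default text, then the if/elif
-- cascade reassigns the same key; the dict's items are the result.
def get_field_descriptions_py (table_name : String) (columns_info : List (String × String)) : List (String × String) :=
  (columns_info.foldl (fun (descriptions : PySem.Dict String String) p =>
    let col_name := p.1
    let col_type := p.2
    let descriptions := descriptions.insert col_name
      ("Campo " ++ col_name ++ " de tipo " ++ col_type ++ ".")
    if col_name == "id" then
      descriptions.insert col_name "Identificador único para el registro."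
    else if PySem.Str.isIn "fecha" (PySem.Str.lower col_name) ||
            PySem.Str.isIn "date" (PySem.Str.lower col_name) then
      descriptions.insert col_name "Fecha en formato YYYY-MM-DD o YYYY-MM-DD HH:MM:SS."
    else if PySem.Str.isIn "monto" (PySem.Str.lower col_name) ||
            PySem.Str.isIn "valor" (PySem.Str.lower col_name) then
      descriptions.insert col_name "Valor monetario o numérico."
    else if PySem.Str.isIn "email" (PySem.Str.lower col_name) then
      descriptions.insert col_name "Dirección de correo electrónico."
    else if PySem.Str.isIn "telefono" (PySem.Str.lower col_name) then
      descriptions.insert col_name "Número de teléfono."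
    else descriptions) PySem.Dict.empty).items

-- ===== PORT B =====
-- literal port of B: the defaults dict first, then five overwrite passes in
-- reverse priority order (telefono, email, monto/valor, fecha/date, id).
def get_field_descriptions_py_alt (table_name : String) (columns_info : List (String × String)) : List (String × String) :=
  let desc : PySem.Dict String String := columns_info.foldl (fun d p =>
    d.insert p.1 ("Campo " ++ p.1 ++ " de tipo " ++ p.2 ++ ".")) PySem.Dict.empty
  let desc := columns_info.foldl (fun d p =>
    if PySem.Str.isIn "telefono" (PySem.Str.lower p.1) then
      d.insert p.1 "Número de teléfono." else d) desc
  let desc := columns_info.foldl (fun d p =>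
    if PySem.Str.isIn "email" (PySem.Str.lower p.1) then
      d.insert p.1 "Dirección de correo electrónico." else d) desc
  let desc := columns_info.foldl (fun d p =>
    if PySem.Str.isIn "monto" (PySem.Str.lower p.1) || PySem.Str.isIn "valor" (PySem.Str.lower p.1) then
      d.insert p.1 "Valor monetario o numérico." else d) desc
  let desc := columns_info.foldl (fun d p =>
    if PySem.Str.isIn "fecha" (PySem.Str.lower p.1) || PySem.Str.isIn "date" (PySem.Str.lower p.1) then
      d.insert p.1 "Fecha en formato YYYY-MM-DD o YYYY-MM-DD HH:MM:SS." else d) desc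
  let desc := columns_info.foldl (fun d p =>
    if p.1 == "id" then
      d.insert p.1 "Identificador único para el registro." else d) desc
  desc.items

-- ===== PRECONDITION & SPEC =====
def Spec_get_field_descriptions_py (table_name : String) (columns_info : List (String × String)) (out : List (String × String)) : Prop := out = get_field_descriptions_py_alt table_name columns_info
instance (table_name : String) (columns_info : List (String × String)) (out : List (String × String)) : Decidable (Spec_get_field_descriptions_py table_name columns_info out) := by unfold Spec_get_field_descriptions_py; infer_instance

-- ===== CLAIM (what is proved, stated in full; the proofs are below) =====
def Claim_equal_get_field_descriptions_py : Prop := ∀ (table_name : String) (columns_info : List (String × String)), Dom_get_field_descriptions_py table_name columns_info → Spec_get_field_descriptions_py table_name columns_info (get_field_descriptions_py table_name columns_info)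

-- ===== LEMMAS AND PROOFS =====

-- the first-match text A ends up assigning for a column (name, type)
def pvF (p : String × String) : String :=
  if p.1 == "id" then "Identificador único para el registro."
  else if PySem.Str.isIn "fecha" (PySem.Str.lower p.1) ||
          PySem.Str.isIn "date" (PySem.Str.lower p.1) then
    "Fecha en formato YYYY-MM-DD o YYYY-MM-DD HH:MM:SS."
  else if PySem.Str.isIn "monto" (PySem.Str.lower p.1) ||
          PySem.Str.isIn "valor" (PySem.Str.lower p.1) then
    "Valor monetario o numérico."
  else if PySem.Str.isIn "email" (PySem.Str.lower p.1) then
    "Dirección de correo electrónico."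
  else if PySem.Str.isIn "telefono" (PySem.Str.lower p.1) then
    "Número de teléfono."
  else "Campo " ++ p.1 ++ " de tipo " ++ p.2 ++ "."

-- A's loop body (default insert then conditional overwrite at the same key)
-- is one insert of the first-match text
theorem pv_step_eq (d : PySem.Dict String String) (p : String × String) :
    (let descriptions := d.insert p.1 ("Campo " ++ p.1 ++ " de tipo " ++ p.2 ++ ".")
     if p.1 == "id" then
       descriptions.insert p.1 "Identificador único para el registro."
     else if PySem.Str.isIn "fecha" (PySem.Str.lower p.1) ||
             PySem.Str.isIn "date" (PySem.Str.lower p.1) then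
       descriptions.insert p.1 "Fecha en formato YYYY-MM-DD o YYYY-MM-DD HH:MM:SS."
     else if PySem.Str.isIn "monto" (PySem.Str.lower p.1) ||
             PySem.Str.isIn "valor" (PySem.Str.lower p.1) then
       descriptions.insert p.1 "Valor monetario o numérico."
     else if PySem.Str.isIn "email" (PySem.Str.lower p.1) then
       descriptions.insert p.1 "Dirección de correo electrónico."
     else if PySem.Str.isIn "telefono" (PySem.Str.lower p.1) then
       descriptions.insert p.1 "Número de teléfono."
     else descriptions) = d.insert p.1 (pvF p) := by
  simp only [pvF]
  split_ifs <;> simp_all [PySem.Dict.insert_insert_self]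

-- two foldls with pointwise-equal step functions agree
theorem pv_foldl_ext {α β : Type} (f g : β → α → β) (h : ∀ b a, f b a = g b a) :
    ∀ (l : List α) (b : β), l.foldl f b = l.foldl g b := by
  intro l
  induction l with
  | nil => intro b; rfl
  | cons x xs ih => intro b; simp only [List.foldl_cons, h]; exact ih _

-- lookup after a fold of unconditional inserts = value of the LAST occurrence
theorem pv_foldIns_getD (f : String × String → String) (k dflt : String) :
    ∀ (L : List (String × String)) (d : PySem.Dict String String),
      (L.foldl (fun d p => d.insert p.1 (f p)) d).getD k dflt =
        (match L.reverse.find? (fun p => p.1 == k) with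
         | some q => f q
         | none => d.getD k dflt) := by
  intro L
  induction L with
  | nil => intro d; rfl
  | cons x xs ih =>
      intro d
      simp only [List.foldl_cons, ih, List.reverse_cons, List.find?_append]
      cases h : xs.reverse.find? (fun p => p.1 == k) with
      | some q => simp
      | none =>
          simp only [List.find?]
          by_cases hk : x.1 = k
          · simp [hk]
          · have hne : (x.1 == k) = false := by simp [hk]
            simp [hne, PySem.Dict.getD_insert, Ne.symm hk]

-- lookup after one overwrite pass: the constant text if some column key equals
-- k and the pass condition holds at k, else unchanged
theorem pv_pass_getD (c : String → Bool) (t k dflt : String) :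
    ∀ (L : List (String × String)) (d : PySem.Dict String String),
      (L.foldl (fun d p => if c p.1 then d.insert p.1 t else d) d).getD k dflt =
        if (L.any (fun p => p.1 == k)) && c k then t else d.getD k dflt := by
  intro L
  induction L with
  | nil => intro d; simp
  | cons x xs ih =>
      intro d
      simp only [List.foldl_cons, ih, List.any_cons]
      by_cases hk : x.1 = k
      · subst hk
        by_cases hc : c x.1
        · simp [hc, PySem.Dict.getD_insert_self]
        · simp [hc]
      · have hne : (x.1 == k) = false := by simp [hk]
        by_cases hc : c x.1
        · simp only [hc, if_pos, hne, Bool.false_or]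
          rw [PySem.Dict.getD_insert]
          simp [Ne.symm hk]
        · simp only [hc, if_neg, Bool.false_eq_true, not_false_iff, hne, Bool.false_or]

-- keys of one overwrite pass: unchanged when every column key is present
theorem pv_pass_keys (c : String → Bool) (t : String) :
    ∀ (L : List (String × String)) (d : PySem.Dict String String),
      (∀ p ∈ L, d.contains p.1 = true) →
      (L.foldl (fun d p => if c p.1 then d.insert p.1 t else d) d).keys = d.keys := by
  intro L
  induction L with
  | nil => intro d _; rfl
  | cons x xs ih =>
      intro d h
      simp only [List.foldl_cons]
      by_cases hc : c x.1
      · simp only [hc, if_pos]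
        rw [ih _ (fun p hp => by
          rw [PySem.Dict.contains_insert]
          simp [h p (List.mem_cons_of_mem _ hp)])]
        exact PySem.Dict.keys_insert_of_contains _ _ (h x (List.mem_cons_self))
      · simp only [hc, if_neg, Bool.false_eq_true, not_false_iff]
        exact ih _ (fun p hp => h p (List.mem_cons_of_mem _ hp))

-- proof-side names for A's fused dict and B's staged dicts
def pvA (L : List (String × String)) : PySem.Dict String String :=
  L.foldl (fun d p => d.insert p.1 (pvF p)) PySem.Dict.empty
def pvD0 (L : List (String × String)) : PySem.Dict String String :=
  L.foldl (fun d p => d.insert p.1 ("Campo " ++ p.1 ++ " de tipo " ++ p.2 ++ ".")) PySem.Dict.empty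
def pvD1 (L : List (String × String)) : PySem.Dict String String :=
  L.foldl (fun d p => if PySem.Str.isIn "telefono" (PySem.Str.lower p.1) then
    d.insert p.1 "Número de teléfono." else d) (pvD0 L)
def pvD2 (L : List (String × String)) : PySem.Dict String String :=
  L.foldl (fun d p => if PySem.Str.isIn "email" (PySem.Str.lower p.1) then
    d.insert p.1 "Dirección de correo electrónico." else d) (pvD1 L)
def pvD3 (L : List (String × String)) : PySem.Dict String String :=
  L.foldl (fun d p => if PySem.Str.isIn "monto" (PySem.Str.lower p.1) || PySem.Str.isIn "valor" (PySem.Str.lower p.1) then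
    d.insert p.1 "Valor monetario o numérico." else d) (pvD2 L)
def pvD4 (L : List (String × String)) : PySem.Dict String String :=
  L.foldl (fun d p => if PySem.Str.isIn "fecha" (PySem.Str.lower p.1) || PySem.Str.isIn "date" (PySem.Str.lower p.1) then
    d.insert p.1 "Fecha en formato YYYY-MM-DD o YYYY-MM-DD HH:MM:SS." else d) (pvD3 L)
def pvD5 (L : List (String × String)) : PySem.Dict String String :=
  L.foldl (fun d p => if p.1 == "id" then
    d.insert p.1 "Identificador único para el registro." else d) (pvD4 L)

-- the keys of A's dict and of every staged dict of B coincide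
theorem pv_keys_A (L : List (String × String)) :
    (pvA L).keys = PySem.Set.update (PySem.Dict.empty : PySem.Dict String String).keys (L.map Prod.fst) := by
  unfold pvA; exact PySem.Dict.keys_foldl_insert_key L Prod.fst _ _

theorem pv_keys_D0 (L : List (String × String)) :
    (pvD0 L).keys = PySem.Set.update (PySem.Dict.empty : PySem.Dict String String).keys (L.map Prod.fst) := by
  unfold pvD0; exact PySem.Dict.keys_foldl_insert_key L Prod.fst _ _

theorem pv_contains_of_keys (d : PySem.Dict String String) (L : List (String × String))
    (h : d.keys = PySem.Set.update (PySem.Dict.empty : PySem.Dict String String).keys (L.map Prod.fst)) :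
    ∀ p ∈ L, d.contains p.1 = true := by
  intro p hp
  rw [PySem.Dict.contains_iff_mem_keys, h, PySem.Set.mem_update]
  exact Or.inr (List.mem_map_of_mem hp)

theorem pv_keys_D1 (L : List (String × String)) :
    (pvD1 L).keys = (pvD0 L).keys := by
  unfold pvD1
  exact pv_pass_keys (fun n => PySem.Str.isIn "telefono" (PySem.Str.lower n))
    "Número de teléfono." L _ (pv_contains_of_keys _ L (pv_keys_D0 L))

theorem pv_keys_D2 (L : List (String × String)) :
    (pvD2 L).keys = (pvD0 L).keys := by
  unfold pvD2
  rw [pv_pass_keys (fun n => PySem.Str.isIn "email" (PySem.Str.lower n))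
    "Dirección de correo electrónico." L _ (pv_contains_of_keys _ L ((pv_keys_D1 L).trans (pv_keys_D0 L)))]
  exact pv_keys_D1 L

theorem pv_keys_D3 (L : List (String × String)) :
    (pvD3 L).keys = (pvD0 L).keys := by
  unfold pvD3
  rw [pv_pass_keys (fun n => PySem.Str.isIn "monto" (PySem.Str.lower n) || PySem.Str.isIn "valor" (PySem.Str.lower n))
    "Valor monetario o numérico." L _ (pv_contains_of_keys _ L ((pv_keys_D2 L).trans (pv_keys_D0 L)))]
  exact pv_keys_D2 L

theorem pv_keys_D4 (L : List (String × String)) :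
    (pvD4 L).keys = (pvD0 L).keys := by
  unfold pvD4
  rw [pv_pass_keys (fun n => PySem.Str.isIn "fecha" (PySem.Str.lower n) || PySem.Str.isIn "date" (PySem.Str.lower n))
    "Fecha en formato YYYY-MM-DD o YYYY-MM-DD HH:MM:SS." L _ (pv_contains_of_keys _ L ((pv_keys_D3 L).trans (pv_keys_D0 L)))]
  exact pv_keys_D3 L

theorem pv_keys_D5 (L : List (String × String)) :
    (pvD5 L).keys = (pvD0 L).keys := by
  unfold pvD5
  rw [pv_pass_keys (fun n => n == "id")
    "Identificador único para el registro." L _ (pv_contains_of_keys _ L ((pv_keys_D4 L).trans (pv_keys_D0 L)))]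
  exact pv_keys_D4 L

-- at every key of the dicts the two lookups agree
theorem pv_getD_eq (L : List (String × String)) (k : String)
    (hk : k ∈ (pvA L).keys) : (pvA L).getD k "" = (pvD5 L).getD k "" := by
  have hkL : k ∈ L.map Prod.fst := by
    rw [pv_keys_A, PySem.Set.mem_update] at hk
    rcases hk with h | h
    · simp [PySem.Dict.keys_empty] at h
    · exact h
  have hany : (L.any fun p => p.1 == k) = true := by
    rw [List.any_eq_true]
    obtain ⟨p, hp, hpk⟩ := List.mem_map.mp hkL
    exact ⟨p, hp, by simp [hpk]⟩
  have hfind : ∃ q, L.reverse.find? (fun p => p.1 == k) = some q := by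
    rw [← Option.isSome_iff_exists, List.find?_isSome]
    obtain ⟨p, hp, hpk⟩ := List.mem_map.mp hkL
    exact ⟨p, List.mem_reverse.mpr hp, by simp [hpk]⟩
  obtain ⟨q, hq⟩ := hfind
  have hq1 : q.1 = k := by simpa using List.find?_some hq
  have hA : (pvA L).getD k "" = pvF q := by
    unfold pvA; rw [pv_foldIns_getD pvF k "" L, hq]
  have hB0 : (pvD0 L).getD k "" = "Campo " ++ q.1 ++ " de tipo " ++ q.2 ++ "." := by
    unfold pvD0
    rw [pv_foldIns_getD (fun p => "Campo " ++ p.1 ++ " de tipo " ++ p.2 ++ ".") k "" L, hq]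
  rw [hA]
  unfold pvD5
  rw [pv_pass_getD (fun n => n == "id") _ k "" L]
  unfold pvD4
  rw [pv_pass_getD (fun n => PySem.Str.isIn "fecha" (PySem.Str.lower n) || PySem.Str.isIn "date" (PySem.Str.lower n)) _ k "" L]
  unfold pvD3
  rw [pv_pass_getD (fun n => PySem.Str.isIn "monto" (PySem.Str.lower n) || PySem.Str.isIn "valor" (PySem.Str.lower n)) _ k "" L]
  unfold pvD2
  rw [pv_pass_getD (fun n => PySem.Str.isIn "email" (PySem.Str.lower n)) _ k "" L]
  unfold pvD1
  rw [pv_pass_getD (fun n => PySem.Str.isIn "telefono" (PySem.Str.lower n)) _ k "" L]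
  rw [hB0]
  unfold pvF
  rw [hq1]
  simp only [hany, Bool.true_and]

-- A's dict and B's final dict have equal item lists
theorem pv_items_eq (L : List (String × String)) : (pvA L).items = (pvD5 L).items := by
  have hndA : (pvA L).keys.Nodup := by
    unfold pvA
    exact PySem.Dict.nodup_keys_foldl_insert_key L Prod.fst _ _ PySem.Dict.nodup_keys_empty
  have hkeys : (pvD5 L).keys = (pvA L).keys := by
    rw [pv_keys_D5, pv_keys_D0, pv_keys_A]
  have hndB : (pvD5 L).keys.Nodup := hkeys ▸ hndA
  rw [PySem.Dict.items_eq_map_keys (pvA L) hndA "",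
      PySem.Dict.items_eq_map_keys (pvD5 L) hndB "", hkeys]
  exact List.map_congr_left (fun k hk => by rw [pv_getD_eq L k hk])

-- ===== VERDICT (by name: the statement is the Claim_ definition above) =====
theorem get_field_descriptions_py_spec : Claim_equal_get_field_descriptions_py := by
  intro table_name columns_info _dom
  unfold Spec_get_field_descriptions_py get_field_descriptions_py get_field_descriptions_py_alt
  rw [pv_foldl_ext _ _ pv_step_eq]
  exact pv_items_eq columns_info
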